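-- pv_equiv track=rewrite | github.com/david31233123/ipo-lr-10 | task_5/main.py | intersectionAreaMultiRect
-- ===== SOURCE A (Python) =====
-- class RectCorrectError(Exception):
--     pass
--
-- def intersectionAreaMultiRect(rects):
--     if not rects:
--         return 0
--     for r in rects:
--         (x1, y1), (x2, y2) = r
--         if not (x1 < x2 and y1 < y2):
--             raise RectCorrectError("Некорректный прямоугольник")
--     x_left, y_bottom = rects[0][0]
--     x_right, y_top = rects[0][1]
--     for r in rects[1:]:
--         (cx1, cy1), (cx2, cy2) = r
--         x_left = max(x_left, cx1)
--         y_bottom = max(y_bottom, cy1)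
--         x_right = min(x_right, cx2)
--         y_top = min(y_top, cy2)
--         if x_right <= x_left or y_top <= y_bottom:
--             return 0
--     return (x_right - x_left) * (y_top - y_bottom)
-- ===== SOURCE B (Python) =====
-- class RectCorrectError(Exception):
--     pass
--
-- def _clip(a, b):
--     # intersection of two optional rectangles; None = empty
--     if a is None or b is None:
--         return None
--     (ax1, ay1), (ax2, ay2) = a
--     (bx1, by1), (bx2, by2) = b
--     x1, y1 = max(ax1, bx1), max(ay1, by1)
--     x2, y2 = min(ax2, bx2), min(ay2, by2)
--     if x1 < x2 and y1 < y2: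
--         return ((x1, y1), (x2, y2))
--     return None
--
-- def _inter(rects, lo, hi):
--     # divide-and-conquer intersection of rects[lo:hi] (hi > lo)
--     if hi - lo == 1:
--         return rects[lo]
--     mid = (lo + hi) // 2
--     return _clip(_inter(rects, lo, mid), _inter(rects, mid, hi))
--
-- def intersectionAreaMultiRect(rects):
--     for r in rects:
--         (x1, y1), (x2, y2) = r
--         if not (x1 < x2 and y1 < y2):
--             raise RectCorrectError("Некорректный прямоугольник")
--     if not rects:
--         return 0
--     box = _inter(rects, 0, len(rects))
--     if box is None:
--         return 0
--     (x1, y1), (x2, y2) = box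
--     return (x2 - x1) * (y2 - y1)
-- ===== Notes on version B (the rewrite author's own statement) =====
-- stated objective: alternative
-- what changed: A's single stateful pass threading four running bounds with an early return is replaced by a divide-and-conquer reduction: the list is recursively split in half and the two halves' intersections are combined by an Option-valued two-rectangle clip operation (None = empty intersection), with the area taken once at the top.
import Mathlib
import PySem

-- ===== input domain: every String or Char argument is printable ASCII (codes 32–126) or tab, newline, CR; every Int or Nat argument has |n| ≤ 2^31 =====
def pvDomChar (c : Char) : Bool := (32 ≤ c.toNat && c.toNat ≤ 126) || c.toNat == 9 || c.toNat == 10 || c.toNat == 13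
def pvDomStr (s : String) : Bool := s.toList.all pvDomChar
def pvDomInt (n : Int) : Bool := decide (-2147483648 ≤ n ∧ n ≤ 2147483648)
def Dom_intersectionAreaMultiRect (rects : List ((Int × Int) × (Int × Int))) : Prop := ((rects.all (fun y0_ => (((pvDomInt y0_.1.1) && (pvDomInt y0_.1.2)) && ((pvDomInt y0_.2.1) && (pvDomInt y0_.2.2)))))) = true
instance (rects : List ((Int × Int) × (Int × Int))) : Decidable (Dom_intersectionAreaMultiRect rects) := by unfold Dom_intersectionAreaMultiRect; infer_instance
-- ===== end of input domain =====

-- B replaces A's single running-bounds loop (with early return) by a divide-and-conquer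
-- reduction combining halves with an Option-valued two-rectangle clip (alternative).
-- A raises RectCorrectError on any degenerate rectangle; those inputs are excluded by Pre_
-- (B raises there too).

-- ===== PORT A =====
-- A's second loop: running bounds with early return 0 as soon as the intersection empties.
def intersectionAreaMultiRectLoop (rs : List ((Int × Int) × (Int × Int)))
    (xLeft yBottom xRight yTop : Int) : Int :=
  match rs with
  | [] => (xRight - xLeft) * (yTop - yBottom)
  | ((cx1, cy1), (cx2, cy2)) :: rest =>
    let xLeft' := max xLeft cx1
    let yBottom' := max yBottom cy1
    let xRight' := min xRight cx2
    let yTop' := min yTop cy2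
    if xRight' ≤ xLeft' ∨ yTop' ≤ yBottom' then 0
    else intersectionAreaMultiRectLoop rest xLeft' yBottom' xRight' yTop'

def intersectionAreaMultiRect (rects : List ((Int × Int) × (Int × Int))) : Int :=
  match rects with
  | [] => 0
  | r0 :: rest =>
    -- A's validation loop; where Python raises RectCorrectError the port's value (0) is
    -- irrelevant: Pre_ excludes those inputs.
    if (r0 :: rest).any (fun r => !(decide (r.1.1 < r.2.1) && decide (r.1.2 < r.2.2))) then 0
    else intersectionAreaMultiRectLoop rest r0.1.1 r0.1.2 r0.2.1 r0.2.2

-- ===== PORT B =====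
-- Python _clip: intersection of two optional rectangles (none = empty).
def pvClip (a b : Option ((Int × Int) × (Int × Int))) : Option ((Int × Int) × (Int × Int)) :=
  match a, b with
  | some ((ax1, ay1), (ax2, ay2)), some ((bx1, by1), (bx2, by2)) =>
    let x1 := max ax1 bx1
    let y1 := max ay1 by1
    let x2 := min ax2 bx2
    let y2 := min ay2 by2
    if x1 < x2 ∧ y1 < y2 then some ((x1, y1), (x2, y2)) else none
  | _, _ => none

-- Python _inter: divide-and-conquer over the (nonempty) slice, split at its midpoint.
def pvInterDC (l : List ((Int × Int) × (Int × Int))) : Option ((Int × Int) × (Int × Int)) :=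
  match l with
  | [] => none       -- Python never calls _inter on an empty slice
  | [r] => some r
  | r1 :: r2 :: rs =>
    pvClip (pvInterDC ((r1 :: r2 :: rs).take ((r1 :: r2 :: rs).length / 2)))
           (pvInterDC ((r1 :: r2 :: rs).drop ((r1 :: r2 :: rs).length / 2)))
termination_by l.length
decreasing_by
  · simp [List.length_take]; omega
  · simp [List.length_drop]; omega

def intersectionAreaMultiRect_alt (rects : List ((Int × Int) × (Int × Int))) : Int :=
  -- B's validation loop (raises there; excluded by Pre_)
  if rects.any (fun r => !(decide (r.1.1 < r.2.1) && decide (r.1.2 < r.2.2))) then 0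
  else
    match rects with
    | [] => 0
    | _ :: _ =>
      match pvInterDC rects with
      | none => 0
      | some ((x1, y1), (x2, y2)) => (x2 - x1) * (y2 - y1)

-- ===== PRECONDITION & SPEC =====
-- Pre_ excludes exactly the inputs on which A raises RectCorrectError (a degenerate rectangle).
def Pre_intersectionAreaMultiRect (rects : List ((Int × Int) × (Int × Int))) : Prop :=
  ∀ r ∈ rects, r.1.1 < r.2.1 ∧ r.1.2 < r.2.2
instance (rects : List ((Int × Int) × (Int × Int))) : Decidable (Pre_intersectionAreaMultiRect rects) := by unfold Pre_intersectionAreaMultiRect; infer_instance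
def pvWitness_intersectionAreaMultiRect : (List ((Int × Int) × (Int × Int))) := ([((0, 0), (2, 3)), ((1, 1), (4, 4))])
def Spec_intersectionAreaMultiRect (rects : List ((Int × Int) × (Int × Int))) (out : Int) : Prop := out = intersectionAreaMultiRect_alt rects
instance (rects : List ((Int × Int) × (Int × Int))) (out : Int) : Decidable (Spec_intersectionAreaMultiRect rects out) := by unfold Spec_intersectionAreaMultiRect; infer_instance

-- ===== CLAIM (what is proved, stated in full; the proofs are below) =====
def Claim_equal_intersectionAreaMultiRect : Prop := ∀ (rects : List ((Int × Int) × (Int × Int))), Dom_intersectionAreaMultiRect rects → Pre_intersectionAreaMultiRect rects → Spec_intersectionAreaMultiRect rects (intersectionAreaMultiRect rects)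

-- ===== LEMMAS AND PROOFS =====

-- canonical intersection of a nonempty list: the four bounds, none if empty
def pvCanon (l : List ((Int × Int) × (Int × Int))) : Option ((Int × Int) × (Int × Int)) :=
  match l with
  | [] => none
  | r0 :: rest =>
    let xl := rest.foldl (fun a r => max a r.1.1) r0.1.1
    let yb := rest.foldl (fun a r => max a r.1.2) r0.1.2
    let xr := rest.foldl (fun a r => min a r.2.1) r0.2.1
    let yt := rest.foldl (fun a r => min a r.2.2) r0.2.2
    if xr ≤ xl ∨ yt ≤ yb then none else some ((xl, yb), (xr, yt))

theorem pv_foldl_max_max (f : ((Int × Int) × (Int × Int)) → Int) :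
    ∀ (l : List ((Int × Int) × (Int × Int))) (a b : Int),
      l.foldl (fun x r => max x (f r)) (max a b) = max a (l.foldl (fun x r => max x (f r)) b) := by
  intro l
  induction l with
  | nil => intro a b; rfl
  | cons r rest ih =>
    intro a b
    simp only [List.foldl_cons, max_assoc]
    exact ih a (max b (f r))

theorem pv_foldl_min_min (f : ((Int × Int) × (Int × Int)) → Int) :
    ∀ (l : List ((Int × Int) × (Int × Int))) (a b : Int),
      l.foldl (fun x r => min x (f r)) (min a b) = min a (l.foldl (fun x r => min x (f r)) b) := by
  intro l
  induction l with
  | nil => intro a b; rfl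
  | cons r rest ih =>
    intro a b
    simp only [List.foldl_cons, min_assoc]
    exact ih a (min b (f r))

theorem pv_le_foldl_max (f : ((Int × Int) × (Int × Int)) → Int) :
    ∀ (l : List ((Int × Int) × (Int × Int))) (a : Int), a ≤ l.foldl (fun x r => max x (f r)) a := by
  intro l
  induction l with
  | nil => intro a; simp
  | cons r rest ih =>
    intro a
    exact le_trans (le_max_left a (f r)) (ih (max a (f r)))

theorem pv_foldl_min_le (f : ((Int × Int) × (Int × Int)) → Int) :
    ∀ (l : List ((Int × Int) × (Int × Int))) (a : Int), l.foldl (fun x r => min x (f r)) a ≤ a := by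
  intro l
  induction l with
  | nil => intro a; simp
  | cons r rest ih =>
    intro a
    exact le_trans (ih (min a (f r))) (min_le_left a (f r))

-- clip of the canonical intersections of two nonempty lists = canonical intersection of their append
theorem pv_clip_canon (l1 l2 : List ((Int × Int) × (Int × Int))) (h1 : l1 ≠ []) (h2 : l2 ≠ []) :
    pvClip (pvCanon l1) (pvCanon l2) = pvCanon (l1 ++ l2) := by
  obtain ⟨r0, rest1, rfl⟩ := List.exists_cons_of_ne_nil h1
  obtain ⟨s0, rest2, rfl⟩ := List.exists_cons_of_ne_nil h2
  simp only [pvCanon, List.cons_append, List.foldl_append, List.foldl_cons]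
  set XL1 := rest1.foldl (fun a r => max a r.1.1) r0.1.1 with hXL1
  set YB1 := rest1.foldl (fun a r => max a r.1.2) r0.1.2 with hYB1
  set XR1 := rest1.foldl (fun a r => min a r.2.1) r0.2.1 with hXR1
  set YT1 := rest1.foldl (fun a r => min a r.2.2) r0.2.2 with hYT1
  have eXL : rest2.foldl (fun a r => max a r.1.1) (max XL1 s0.1.1)
      = max XL1 (rest2.foldl (fun a r => max a r.1.1) s0.1.1) := pv_foldl_max_max _ rest2 XL1 s0.1.1
  have eYB : rest2.foldl (fun a r => max a r.1.2) (max YB1 s0.1.2)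
      = max YB1 (rest2.foldl (fun a r => max a r.1.2) s0.1.2) := pv_foldl_max_max _ rest2 YB1 s0.1.2
  have eXR : rest2.foldl (fun a r => min a r.2.1) (min XR1 s0.2.1)
      = min XR1 (rest2.foldl (fun a r => min a r.2.1) s0.2.1) := pv_foldl_min_min _ rest2 XR1 s0.2.1
  have eYT : rest2.foldl (fun a r => min a r.2.2) (min YT1 s0.2.2)
      = min YT1 (rest2.foldl (fun a r => min a r.2.2) s0.2.2) := pv_foldl_min_min _ rest2 YT1 s0.2.2
  rw [eXL, eYB, eXR, eYT]
  set XL2 := rest2.foldl (fun a r => max a r.1.1) s0.1.1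
  set YB2 := rest2.foldl (fun a r => max a r.1.2) s0.1.2
  set XR2 := rest2.foldl (fun a r => min a r.2.1) s0.2.1
  set YT2 := rest2.foldl (fun a r => min a r.2.2) s0.2.2
  by_cases c1 : XR1 ≤ XL1 ∨ YT1 ≤ YB1
  · rw [if_pos c1]
    simp only [pvClip]
    rw [if_pos (by omega)]
  · rw [if_neg c1]
    by_cases c2 : XR2 ≤ XL2 ∨ YT2 ≤ YB2
    · rw [if_pos c2]
      simp only [pvClip]
      rw [if_pos (by omega)]
    · rw [if_neg c2]
      simp only [pvClip]
      by_cases c3 : max XL1 XL2 < min XR1 XR2 ∧ max YB1 YB2 < min YT1 YT2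
      · rw [if_pos c3, if_neg (by omega)]
      · rw [if_neg c3, if_pos (by omega)]

-- the divide-and-conquer intersection computes the canonical one (on valid rectangles)
theorem pv_interDC_eq_canon :
    ∀ (n : Nat) (l : List ((Int × Int) × (Int × Int))), l.length ≤ n → l ≠ [] →
      (∀ r ∈ l, r.1.1 < r.2.1 ∧ r.1.2 < r.2.2) → pvInterDC l = pvCanon l := by
  intro n
  induction n with
  | zero => intro l hl hne _; cases l with | nil => exact absurd rfl hne | cons a t => simp at hl
  | succ n ih =>
    intro l hl hne hval
    match l with
    | [r] =>
      have hv := hval r (List.mem_cons_self)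
      simp [pvInterDC, pvCanon]
      omega
    | r1 :: r2 :: rs =>
      rw [pvInterDC]
      have hlen : (r1 :: r2 :: rs).length = rs.length + 2 := by simp
      set L := r1 :: r2 :: rs with hL
      set m := L.length / 2 with hm
      have hm1 : 1 ≤ m := by simp [hm, hL]; omega
      have hmlt : m < L.length := by simp [hm, hL]; omega
      have htne : L.take m ≠ [] := by
        intro h; have := congrArg List.length h
        simp [List.length_take] at this; omega
      have hdne : L.drop m ≠ [] := by
        intro h; have := congrArg List.length h
        simp [List.length_drop] at this; omega
      have htlen : (L.take m).length ≤ n := by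
        simp [List.length_take]; simp [hL] at hl ⊢; omega
      have hdlen : (L.drop m).length ≤ n := by
        simp [List.length_drop]; simp [hL] at hl ⊢; omega
      rw [ih (L.take m) htlen htne (fun r hr => hval r (List.take_subset m L hr)),
          ih (L.drop m) hdlen hdne (fun r hr => hval r (List.drop_subset m L hr)),
          pv_clip_canon _ _ htne hdne, List.take_append_drop]

-- A's running-bounds loop equals the closed-form four-bounds expression
theorem pv_loop_eq (rest : List ((Int × Int) × (Int × Int))) :
    ∀ (xl yb xr yt : Int), xl < xr → yb < yt →
      intersectionAreaMultiRectLoop rest xl yb xr yt =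
        (if rest.foldl (fun a r => min a r.2.1) xr ≤ rest.foldl (fun a r => max a r.1.1) xl
            ∨ rest.foldl (fun a r => min a r.2.2) yt ≤ rest.foldl (fun a r => max a r.1.2) yb
         then 0
         else (rest.foldl (fun a r => min a r.2.1) xr - rest.foldl (fun a r => max a r.1.1) xl) *
              (rest.foldl (fun a r => min a r.2.2) yt - rest.foldl (fun a r => max a r.1.2) yb)) := by
  induction rest with
  | nil =>
    intro xl yb xr yt hx hy
    simp [intersectionAreaMultiRectLoop]
    omega
  | cons r rest ih =>
    intro xl yb xr yt hx hy
    obtain ⟨⟨cx1, cy1⟩, cx2, cy2⟩ := r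
    simp only [intersectionAreaMultiRectLoop, List.foldl_cons]
    by_cases h : min xr cx2 ≤ max xl cx1 ∨ min yt cy2 ≤ max yb cy1
    · rw [if_pos h]
      have hXL := pv_le_foldl_max (fun r => r.1.1) rest (max xl cx1)
      have hYB := pv_le_foldl_max (fun r => r.1.2) rest (max yb cy1)
      have hXR := pv_foldl_min_le (fun r => r.2.1) rest (min xr cx2)
      have hYT := pv_foldl_min_le (fun r => r.2.2) rest (min yt cy2)
      rw [if_pos]
      rcases h with h | h
      · exact Or.inl (le_trans hXR (le_trans h hXL))
      · exact Or.inr (le_trans hYT (le_trans h hYB))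
    · rw [if_neg h]
      push Not at h
      exact ih (max xl cx1) (max yb cy1) (min xr cx2) (min yt cy2) h.1 h.2

-- ===== VERDICT (by name: the statement is the Claim_ definition above) =====
theorem intersectionAreaMultiRect_spec : Claim_equal_intersectionAreaMultiRect := by
  intro rects _ hpre
  unfold Spec_intersectionAreaMultiRect
  cases rects with
  | nil => rfl
  | cons r0 rest =>
    have hany : ((r0 :: rest).any (fun r => !(decide (r.1.1 < r.2.1) && decide (r.1.2 < r.2.2)))) = false := by
      simp only [List.any_eq_false, Bool.not_eq_true']
      intro r hr
      have := hpre r hr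
      simp [this.1, this.2]
    have h0 := hpre r0 (List.mem_cons_self)
    have hDC := pv_interDC_eq_canon (r0 :: rest).length (r0 :: rest) le_rfl (by simp) hpre
    simp only [intersectionAreaMultiRect, intersectionAreaMultiRect_alt, hany,
      Bool.false_eq_true, if_false, hDC, pvCanon]
    rw [pv_loop_eq rest r0.1.1 r0.1.2 r0.2.1 r0.2.2 h0.1 h0.2]
    split_ifs with hc
    · rfl
    · rfl
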